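-- pv_equiv track=rewrite | github.com/alexanderthegreat96/dth-discord-py | core/bot.py | generateArgumentAssociation
-- ===== SOURCE A (Python) =====
-- def generateArgumentAssociation(args, predefinedArguments={}, mainArg=''):
--     associatedArguments = {}
--     if (len(args) and len(predefinedArguments)):
--
--         mergedArgs = []
--         for item in predefinedArguments:
--             mergedArgs.append(item)
--
--             if ('required-arguments' in predefinedArguments[item] and predefinedArguments[item][
--                 'required-arguments'] is not None):
--                 for item in predefinedArguments[item]['required-arguments']:
--                     mergedArgs.append(item)
--
--         if (len(mergedArgs)):
--             for item in mergedArgs: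
--                 if (item in args):
--                     posIndex = args.index(item)
--                     try:
--                         associatedArguments[item] = args[posIndex + 1]
--                     except Exception as e:
--                         associatedArguments[item] = None
--
--     else:
--         if(args):
--             associatedArguments = {mainArg: args[0]}
--         else:
--             associatedArguments = {mainArg: None}
--
--     return associatedArguments
-- ===== SOURCE B (Python) =====
-- def generateArgumentAssociation(args, predefinedArguments={}, mainArg=''):
--     if not (len(args) and len(predefinedArguments)):
--         return {mainArg: args[0] if args else None}
--     # stage 1: the recognised names, in A's merged order, plus a set for O(1) tests
--     mergedArgs = []
--     for name, spec in predefinedArguments.items():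
--         mergedArgs.append(name)
--         req = spec.get('required-arguments')
--         if req is not None:
--             mergedArgs.extend(req)
--     validNames = set(mergedArgs)
--     # stage 2: one positional pass over args; record the token after the FIRST
--     # occurrence of each recognised name (None when it is the last token)
--     found = {}
--     for i, tok in enumerate(args):
--         if tok in validNames and tok not in found:
--             found[tok] = args[i + 1] if i + 1 < len(args) else None
--     # stage 3: emit in merged-name order, as A does
--     return {name: found[name] for name in mergedArgs if name in found}
-- ===== Notes on version B (the rewrite author's own statement) =====
-- stated objective: faster
-- what changed: B inverts the data flow into a staged pipeline: instead of searching args with 'in'/'.index' once per merged name, it walks args positionally once (enumerate) recording the token after the first occurrence of each recognised name, then projects those findings in the predefined-name order.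
import Mathlib
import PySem

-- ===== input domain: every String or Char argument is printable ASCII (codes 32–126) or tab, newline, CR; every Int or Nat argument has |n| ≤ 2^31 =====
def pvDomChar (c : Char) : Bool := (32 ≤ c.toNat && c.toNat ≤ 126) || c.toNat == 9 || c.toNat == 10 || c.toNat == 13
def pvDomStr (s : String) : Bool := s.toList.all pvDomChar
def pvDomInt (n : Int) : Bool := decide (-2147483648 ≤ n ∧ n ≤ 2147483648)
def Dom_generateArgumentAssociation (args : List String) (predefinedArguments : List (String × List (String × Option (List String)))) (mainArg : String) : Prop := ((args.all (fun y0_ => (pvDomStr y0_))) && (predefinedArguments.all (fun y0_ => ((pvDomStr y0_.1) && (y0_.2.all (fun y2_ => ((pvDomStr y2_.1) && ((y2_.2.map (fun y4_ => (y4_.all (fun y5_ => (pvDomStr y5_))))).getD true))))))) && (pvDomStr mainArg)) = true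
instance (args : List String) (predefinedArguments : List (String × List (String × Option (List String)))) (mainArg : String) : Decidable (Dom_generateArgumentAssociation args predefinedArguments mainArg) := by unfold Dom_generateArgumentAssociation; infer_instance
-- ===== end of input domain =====

-- B replaces A's per-name `in`/`.index` scans of args by a staged pipeline: one
-- positional pass over args recording the follower of each recognised name's first
-- occurrence, then a projection in A's key order; objective: faster (one pass over args).


-- ===== PORT A =====
-- `'required-arguments' in spec and spec['required-arguments'] is not None`:
-- the list to append (empty when the key is absent or its value is None)
def gaaReq (spec : List (String × Option (List String))) : List String :=
  match (PySem.Dict.mk spec).get? "required-arguments" with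
  | some (some l) => l
  | _ => []

def generateArgumentAssociation (args : List String) (predefinedArguments : List (String × List (String × Option (List String)))) (mainArg : String) : List (String × Option String) :=
  if args.length ≠ 0 ∧ predefinedArguments.length ≠ 0 then
    let mergedArgs : List String :=
      predefinedArguments.foldl (fun acc p => (acc ++ [p.1]) ++ gaaReq p.2) []
    if mergedArgs.length ≠ 0 then
      (mergedArgs.foldl (fun d item =>
        if item ∈ args then
          match PySem.List.index? args item with
          | some pos => d.insert item (PySem.List.pyGet? args ((pos : Int) + 1))
          | none => d
        else d) PySem.Dict.empty).items
    else []
  else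
    match args with
    | [] => [(mainArg, none)]
    | a :: _ => [(mainArg, some a)]

-- ===== PORT B =====
-- `spec.get('required-arguments')` (None when the key is absent or stored as None)
def gaaReqB (spec : List (String × Option (List String))) : Option (List String) :=
  ((PySem.Dict.mk spec).get? "required-arguments").join

-- `for i, tok in enumerate(args): if tok in validNames and tok not in found:
--      found[tok] = args[i+1] if i+1 < len(args) else None`
def gaaScan (args : List String) (validNames : PySem.Set String) : PySem.Dict String (Option String) :=
  (PySem.List.enumerate args 0).foldl
    (fun d q =>
      if validNames.contains q.2 && !(d.contains q.2) then
        d.insert q.2 (if q.1 + 1 < (args.length : Int) then PySem.List.pyGet? args (q.1 + 1) else none)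
      else d) PySem.Dict.empty

def generateArgumentAssociation_alt (args : List String) (predefinedArguments : List (String × List (String × Option (List String)))) (mainArg : String) : List (String × Option String) :=
  if args.length ≠ 0 ∧ predefinedArguments.length ≠ 0 then
    let mergedArgs : List String :=
      predefinedArguments.foldl (fun acc p => acc ++ p.1 :: (gaaReqB p.2).getD []) []
    let validNames := PySem.Set.ofList mergedArgs
    let found := gaaScan args validNames
    (mergedArgs.foldl (fun d name =>
      match found.get? name with
      | some v => d.insert name v
      | none => d) PySem.Dict.empty).items
  else
    match args with
    | [] => [(mainArg, none)]
    | a :: _ => [(mainArg, some a)]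

-- ===== PRECONDITION & SPEC =====
def Spec_generateArgumentAssociation (args : List String) (predefinedArguments : List (String × List (String × Option (List String)))) (mainArg : String) (out : List (String × Option String)) : Prop := out = generateArgumentAssociation_alt args predefinedArguments mainArg
instance (args : List String) (predefinedArguments : List (String × List (String × Option (List String)))) (mainArg : String) (out : List (String × Option String)) : Decidable (Spec_generateArgumentAssociation args predefinedArguments mainArg out) := by unfold Spec_generateArgumentAssociation; infer_instance

-- ===== CLAIM (what is proved, stated in full; the proofs are below) =====
def Claim_equal_generateArgumentAssociation : Prop := ∀ (args : List String) (predefinedArguments : List (String × List (String × Option (List String)))) (mainArg : String), Dom_generateArgumentAssociation args predefinedArguments mainArg → Spec_generateArgumentAssociation args predefinedArguments mainArg (generateArgumentAssociation args predefinedArguments mainArg)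

-- ===== LEMMAS AND PROOFS =====

theorem gaaReqB_getD (spec : List (String × Option (List String))) :
    (gaaReqB spec).getD [] = gaaReq spec := by
  unfold gaaReqB gaaReq
  cases h : (PySem.Dict.mk spec).get? "required-arguments" with
  | none => simp
  | some o => cases o <;> simp

-- the value associated to the FIRST occurrence of k in args: the following token
-- (none = k is the last token), or `none` outside when k ∉ args
def gaaFirstNext : List String → String → Option (Option String)
  | [], _ => none
  | a :: rest, k => if k = a then some rest.head? else gaaFirstNext rest k

theorem gaaFirstNext_eq_none (rest : List String) (k : String) (hm : k ∉ rest) :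
    gaaFirstNext rest k = none := by
  induction rest with
  | nil => rfl
  | cons b t ih =>
    simp only [List.mem_cons, not_or] at hm
    simp [gaaFirstNext, hm.1, ih hm.2]

theorem gaaScan_aux (args : List String) (validNames : PySem.Set String) :
    ∀ (rest : List String) (i : Nat), rest = args.drop i →
    ∀ (d : PySem.Dict String (Option String)) (k : String),
    ((PySem.List.enumerate rest (i : Int)).foldl
      (fun d q =>
        if validNames.contains q.2 && !(d.contains q.2) then
          d.insert q.2 (if q.1 + 1 < (args.length : Int) then PySem.List.pyGet? args (q.1 + 1) else none)
        else d) d).get? k =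
      match d.get? k with
      | some v => some v
      | none => if validNames.contains k then gaaFirstNext rest k else none := by
  intro rest
  induction rest with
  | nil =>
    intro i _ d k
    simp only [PySem.List.enumerate_nil, List.foldl_nil, gaaFirstNext]
    cases d.get? k <;> simp
  | cons a t ih =>
    intro i hdrop d k
    have ht : t = args.drop (i + 1) := by
      have : args.drop (i + 1) = (args.drop i).tail := by
        rw [← List.drop_drop]
        simp
      rw [this, ← hdrop]
      rfl
    have hval : (if (i : Int) + 1 < (args.length : Int) then PySem.List.pyGet? args ((i : Int) + 1) else none) = t.head? := by
      have hcast : (i : Int) + 1 = ((i + 1 : Nat) : Int) := by push_cast; ring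
      have hget : PySem.List.pyGet? args ((i : Int) + 1) = args[i + 1]? := by
        rw [hcast, PySem.List.pyGet?_natCast]
      have hhead : t.head? = args[i + 1]? := by
        rw [ht]
        cases hh : args.drop (i + 1) with
        | nil =>
          have := List.drop_eq_nil_iff.mp hh
          simp [List.getElem?_eq_none_iff.mpr this]
        | cons b tb =>
          have : args[i + 1]? = (args.drop (i + 1))[0]? := by
            rw [List.getElem?_drop]
          simp [this, hh]
      by_cases hlt : (i : Int) + 1 < (args.length : Int)
      · rw [if_pos hlt, hget, hhead]
      · rw [if_neg hlt, hhead]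
        have : args.length ≤ i + 1 := by omega
        simp [List.getElem?_eq_none_iff.mpr this]
    rw [PySem.List.enumerate_cons, List.foldl_cons]
    have hcast1 : (i : Int) + 1 = ((i + 1 : Nat) : Int) := by push_cast; ring
    rw [hcast1] at hval ⊢
    rw [ih (i + 1) ht]
    push_cast at hval ⊢
    by_cases hk : k = a
    · subst hk
      by_cases hv : validNames.contains k
      · have hm : k ∈ validNames := by simpa using hv
        by_cases hc : d.contains k
        · have hsome : (d.get? k).isSome := by
            rw [← PySem.Dict.contains_eq_isSome_get?]; exact hc
          obtain ⟨v, hvv⟩ := Option.isSome_iff_exists.mp hsome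
          simp [hm, hc, hvv]
        · have hcf : d.contains k = false := by simpa using hc
          have hd : d.get? k = none := by
            cases hdd : d.get? k with
            | none => rfl
            | some v =>
              have hs : (d.get? k).isSome = true := by rw [hdd]; rfl
              rw [← PySem.Dict.contains_eq_isSome_get?] at hs
              exact absurd hs hc
          simp [hm, hcf, hd, gaaFirstNext, hval]
      · have hnm : k ∉ validNames := by simpa using hv
        cases hd : d.get? k <;> simp [hnm, hd]
    · have hstep : ∀ v, (if (validNames.contains a && !(d.contains a)) = true then
          d.insert a v else d).get? k = d.get? k := by
        intro v
        by_cases h : (validNames.contains a && !(d.contains a)) = true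
        · rw [if_pos h, PySem.Dict.get?_insert, if_neg hk]
        · rw [if_neg h]
      simp only [gaaFirstNext, hk, if_false]
      cases hdm : (if (validNames.contains a && !(d.contains a)) = true then
          d.insert a (if (i : Int) + 1 < (args.length : Int) then PySem.List.pyGet? args ((i : Int) + 1) else none)
        else d).get? k with
      | none =>
        rw [hstep _] at hdm
        simp [hdm]
      | some v =>
        rw [hstep _] at hdm
        simp [hdm]

theorem gaaScan_get? (args : List String) (validNames : PySem.Set String) (k : String)
    (hv : validNames.contains k = true) :
    (gaaScan args validNames).get? k = gaaFirstNext args k := by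
  unfold gaaScan
  have h0 := gaaScan_aux args validNames args 0 rfl PySem.Dict.empty k
  simp only [Nat.cast_zero] at h0
  rw [h0, PySem.Dict.get?_empty]
  exact if_pos hv

theorem gaaStep_eq (args : List String) (k : String) (d : PySem.Dict String (Option String)) :
    (if k ∈ args then
      match PySem.List.index? args k with
      | some pos => d.insert k (PySem.List.pyGet? args ((pos : Int) + 1))
      | none => d
     else d)
    = (match gaaFirstNext args k with
       | some v => d.insert k v
       | none => d) := by
  induction args with
  | nil => simp [gaaFirstNext]
  | cons a rest ih =>
    by_cases hk : k = a
    · subst hk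
      simp only [List.mem_cons, true_or, if_true]
      rw [PySem.List.index?_cons_self]
      have hg : PySem.List.pyGet? (k :: rest) (1 : Int) = rest.head? := by
        cases rest <;> simp [PySem.List.pyGet?, PySem.List.pyIdx?]
      simp [gaaFirstNext, hg]
    · rw [PySem.List.index?_cons_of_ne rest (Ne.symm hk)]
      simp only [gaaFirstNext, List.mem_cons, hk, false_or]
      by_cases hm : k ∈ rest
      · obtain ⟨p, hp⟩ := Option.isSome_iff_exists.mp ((PySem.List.index?_isSome_iff rest k).mpr hm)
        have hih := ih
        rw [hp, if_pos hm] at hih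
        rw [hp]
        simp only [Option.map_some, if_pos hm]
        have hg : PySem.List.pyGet? (a :: rest) (((p + 1 : Nat) : Int) + 1)
            = PySem.List.pyGet? rest ((p : Int) + 1) := by
          have h2 := PySem.List.pyGet?_cons_succ a rest (p + 1)
          push_cast at h2 ⊢
          rw [h2]
        rw [hg]
        exact hih
      · rw [(PySem.List.index?_eq_none_iff rest k).mpr hm]
        simp [gaaFirstNext_eq_none rest k hm]

theorem gaaMerged_eq (pred : List (String × List (String × Option (List String)))) :
    pred.foldl (fun acc p => (acc ++ [p.1]) ++ gaaReq p.2) []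
      = pred.foldl (fun acc p => acc ++ p.1 :: (gaaReqB p.2).getD []) [] := by
  have : (fun (acc : List String) (p : String × List (String × Option (List String))) => (acc ++ [p.1]) ++ gaaReq p.2)
      = fun acc p => acc ++ p.1 :: (gaaReqB p.2).getD [] := by
    funext acc p
    rw [gaaReqB_getD]
    simp
  rw [this]

theorem gaaMerged_ne_nil (pred : List (String × List (String × Option (List String))))
    (h : pred.length ≠ 0) :
    (pred.foldl (fun acc p => (acc ++ [p.1]) ++ gaaReq p.2) []).length ≠ 0 := by
  cases pred with
  | nil => simp at h
  | cons p t =>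
    have hmerged : ∀ acc, t.foldl (fun acc p => (acc ++ [p.1]) ++ gaaReq p.2) acc
        = acc ++ t.flatMap (fun p => p.1 :: gaaReq p.2) := by
      intro acc
      induction t generalizing acc with
      | nil => simp
      | cons q s ih => simp [List.foldl_cons, List.flatMap_def]
    simp [List.foldl_cons]

-- ===== VERDICT (by name: the statement is the Claim_ definition above) =====
theorem generateArgumentAssociation_spec : Claim_equal_generateArgumentAssociation := by
  intro args pred mainArg _
  unfold Spec_generateArgumentAssociation generateArgumentAssociation generateArgumentAssociation_alt
  by_cases h : args.length ≠ 0 ∧ pred.length ≠ 0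
  · rw [if_pos h, if_pos h]
    simp only
    rw [if_pos (gaaMerged_ne_nil pred h.2)]
    rw [gaaMerged_eq]
    congr 1
    apply PySem.List.foldl_congr_mem
    intro d item hmem
    rw [gaaScan_get? args _ item (by
      rw [PySem.Set.contains_iff]
      exact (PySem.Set.mem_ofList _ _).mpr hmem)]
    exact gaaStep_eq args item d
  · rw [if_neg h, if_neg h]
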